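-- pv_equiv track=rewrite | github.com/LongWeeeeeee/bets | base/test_filters.py | is_early_match_stable4k_6min
-- ===== SOURCE A (Python) =====
-- from typing import Tuple, Optional, Dict, Any
--
-- def is_early_match_stable4k_6min(match: Dict) -> Tuple[bool, Optional[str]]:
--     """Stable lead >= 4k минимум 6 минут подряд на 15-30."""
--     leads = match.get('radiantNetworthLeads', [])
--     duration = len(leads)
--
--     if duration < 30 or duration > 50:
--         return False, None
--
--     consecutive_r = 0
--     consecutive_d = 0
--
--     for i in range(15, min(30, duration)):
--         if leads[i] >= 4000:
--             consecutive_r += 1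
--             consecutive_d = 0
--             if consecutive_r >= 6:
--                 return True, 'radiant'
--         elif leads[i] <= -4000:
--             consecutive_d += 1
--             consecutive_r = 0
--             if consecutive_d >= 6:
--                 return True, 'dire'
--         else:
--             consecutive_r = 0
--             consecutive_d = 0
--
--     return False, None
-- ===== SOURCE B (Python) =====
-- from typing import Tuple, Optional, Dict
-- from itertools import groupby
--
-- def is_early_match_stable4k_6min(match: Dict) -> Tuple[bool, Optional[str]]:
--     """Stable lead >= 4k for at least 6 consecutive minutes in minutes 15-30."""
--     leads = match.get('radiantNetworthLeads', [])
--     duration = len(leads)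
--
--     if duration < 30 or duration > 50:
--         return False, None
--
--     classes = [1 if leads[i] >= 4000 else (-1 if leads[i] <= -4000 else 0)
--                for i in range(15, min(30, duration))]
--
--     for key, grp in groupby(classes):
--         n = sum(1 for _ in grp)
--         if key == 1 and n >= 6:
--             return True, 'radiant'
--         if key == -1 and n >= 6:
--             return True, 'dire'
--
--     return False, None
-- ===== Notes on version B (the rewrite author's own statement) =====
-- stated objective: simpler
-- what changed: Replaces the dual running counters with early return by classifying each minute into +1/-1/0 and scanning the itertools.groupby runs for the first nonzero run of length >= 6.
import Mathlib
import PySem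

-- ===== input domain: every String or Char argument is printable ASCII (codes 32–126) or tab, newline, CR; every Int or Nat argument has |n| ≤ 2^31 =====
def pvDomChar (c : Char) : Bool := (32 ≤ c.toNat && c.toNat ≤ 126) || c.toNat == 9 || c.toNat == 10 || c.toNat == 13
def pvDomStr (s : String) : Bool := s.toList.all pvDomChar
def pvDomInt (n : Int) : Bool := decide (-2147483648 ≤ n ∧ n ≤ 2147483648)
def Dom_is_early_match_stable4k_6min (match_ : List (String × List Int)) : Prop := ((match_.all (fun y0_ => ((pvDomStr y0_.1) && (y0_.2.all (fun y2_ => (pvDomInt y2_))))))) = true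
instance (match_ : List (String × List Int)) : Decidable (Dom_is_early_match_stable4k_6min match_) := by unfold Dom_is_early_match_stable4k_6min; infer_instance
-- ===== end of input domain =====

-- B replaces A's dual running counters (with early return) by classifying each minute
-- into +1/-1/0 and scanning the group-by runs for the first nonzero run of length ≥ 6 (simpler decomposition).

-- ===== PORT A =====
-- match.get('radiantNetworthLeads', []) : first-match lookup in the association list
def pvLeads (match_ : List (String × List Int)) : List Int :=
  ((match_.find? (fun p => p.1 == "radiantNetworthLeads")).map (·.2)).getD []

-- the for-loop over range(15, min(30, duration)) with the two consecutive counters;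
-- leads[i] is always in range here (15 ≤ i < 30 ≤ duration), so getD 0 is exact
def pvLoopA (idxs : List Int) (leads : List Int) (cr cd : Int) : Bool × Option String :=
  match idxs with
  | [] => (false, none)
  | i :: rest =>
    let v := (PySem.List.pyGet? leads i).getD 0
    if v ≥ 4000 then
      if cr + 1 ≥ 6 then (true, some "radiant") else pvLoopA rest leads (cr + 1) 0
    else if v ≤ -4000 then
      if cd + 1 ≥ 6 then (true, some "dire") else pvLoopA rest leads 0 (cd + 1)
    else pvLoopA rest leads 0 0

def is_early_match_stable4k_6min (match_ : List (String × List Int)) : Bool × Option String :=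
  let leads := pvLeads match_
  let duration : Int := leads.length
  if duration < 30 ∨ duration > 50 then (false, none)
  else pvLoopA (PySem.List.pyRange 15 (min 30 duration) 1) leads 0 0

-- ===== PORT B =====
def pvClassify (x : Int) : Int := if x ≥ 4000 then 1 else if x ≤ -4000 then -1 else 0

-- itertools.groupby, recorded as (key, run length) pairs
def pvRuns : List Int → List (Int × Nat)
  | [] => []
  | c :: cs =>
    match pvRuns cs with
    | [] => [(c, 1)]
    | (k, n) :: rest => if c = k then (c, n + 1) :: rest else (c, 1) :: (k, n) :: rest

-- the loop over the groups: first run with key ±1 and length ≥ 6 decides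
def pvFindRun : List (Int × Nat) → Bool × Option String
  | [] => (false, none)
  | (k, n) :: rest =>
    if k = 1 ∧ n ≥ 6 then (true, some "radiant")
    else if k = -1 ∧ n ≥ 6 then (true, some "dire")
    else pvFindRun rest

def is_early_match_stable4k_6min_alt (match_ : List (String × List Int)) : Bool × Option String :=
  let leads := pvLeads match_
  let duration : Int := leads.length
  if duration < 30 ∨ duration > 50 then (false, none)
  else
    let classes := (PySem.List.pyRange 15 (min 30 duration) 1).map
      (fun i => pvClassify ((PySem.List.pyGet? leads i).getD 0))
    pvFindRun (pvRuns classes)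

-- ===== PRECONDITION & SPEC =====
def Spec_is_early_match_stable4k_6min (match_ : List (String × List Int)) (out : Bool × Option String) : Prop := out = is_early_match_stable4k_6min_alt match_
instance (match_ : List (String × List Int)) (out : Bool × Option String) : Decidable (Spec_is_early_match_stable4k_6min match_ out) := by unfold Spec_is_early_match_stable4k_6min; infer_instance

-- ===== CLAIM (what is proved, stated in full; the proofs are below) =====
def Claim_equal_is_early_match_stable4k_6min : Prop := ∀ (match_ : List (String × List Int)), Dom_is_early_match_stable4k_6min match_ → Spec_is_early_match_stable4k_6min match_ (is_early_match_stable4k_6min match_)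

-- ===== LEMMAS AND PROOFS =====

-- loopC: A's loop re-expressed on the classified values, with Nat counters
def pvLoopC : List Int → Nat → Nat → Bool × Option String
  | [], _, _ => (false, none)
  | c :: cs, cr, cd =>
    if c = 1 then
      if cr + 1 ≥ 6 then (true, some "radiant") else pvLoopC cs (cr + 1) 0
    else if c = -1 then
      if cd + 1 ≥ 6 then (true, some "dire") else pvLoopC cs 0 (cd + 1)
    else pvLoopC cs 0 0

-- credit the carried counter to the first run if its key matches
def pvBump : List (Int × Nat) → Nat → Nat → List (Int × Nat)
  | [], _, _ => []
  | (k, n) :: rest, cr, cd =>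
    (k, n + (if k = 1 then cr else if k = -1 then cd else 0)) :: rest

theorem pvLoopA_eq_loopC (idxs leads : List Int) (cr cd : Nat) :
    pvLoopA idxs leads (cr : Int) (cd : Int) =
      pvLoopC (idxs.map (fun i => pvClassify ((PySem.List.pyGet? leads i).getD 0))) cr cd := by
  induction idxs generalizing cr cd with
  | nil => rfl
  | cons i rest ih =>
    rw [List.map_cons, pvLoopA, pvLoopC]
    by_cases h1 : ((PySem.List.pyGet? leads i).getD 0 : Int) ≥ 4000
    · have hc : pvClassify ((PySem.List.pyGet? leads i).getD 0) = 1 := by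
        simp [pvClassify, h1]
      rw [if_pos h1, hc, if_pos (show (1:Int) = 1 from rfl)]
      by_cases h6 : (cr : Int) + 1 ≥ 6
      · rw [if_pos h6, if_pos (show cr + 1 ≥ 6 by omega)]
      · rw [if_neg h6, if_neg (show ¬ cr + 1 ≥ 6 by omega)]
        have hcast : (cr : Int) + 1 = ((cr + 1 : Nat) : Int) := by push_cast; ring
        rw [hcast]
        exact_mod_cast ih (cr + 1) 0
    · by_cases h2 : ((PySem.List.pyGet? leads i).getD 0 : Int) ≤ -4000
      · have hc : pvClassify ((PySem.List.pyGet? leads i).getD 0) = -1 := by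
          simp [pvClassify, h1, h2]
        rw [if_neg h1, if_pos h2, hc]
        rw [if_neg (show ¬ ((-1:Int) = 1) by norm_num), if_pos (show (-1:Int) = -1 from rfl)]
        by_cases h6 : (cd : Int) + 1 ≥ 6
        · rw [if_pos h6, if_pos (show cd + 1 ≥ 6 by omega)]
        · rw [if_neg h6, if_neg (show ¬ cd + 1 ≥ 6 by omega)]
          have hcast : (cd : Int) + 1 = ((cd + 1 : Nat) : Int) := by push_cast; ring
          rw [hcast]
          exact_mod_cast ih 0 (cd + 1)
      · have hc : pvClassify ((PySem.List.pyGet? leads i).getD 0) = 0 := by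
          simp [pvClassify, h1, h2]
        rw [if_neg h1, if_neg h2, hc]
        rw [if_neg (show ¬ ((0:Int) = 1) by norm_num), if_neg (show ¬ ((0:Int) = -1) by norm_num)]
        exact_mod_cast ih 0 0

theorem pvLoopC_eq_findRun (cs : List Int) (cr cd : Nat) :
    pvLoopC cs cr cd = pvFindRun (pvBump (pvRuns cs) cr cd) := by
  induction cs generalizing cr cd with
  | nil => simp [pvLoopC, pvRuns, pvBump, pvFindRun]
  | cons c cs ih =>
    by_cases h1 : c = 1
    · subst h1
      rw [pvLoopC]; simp only [if_pos rfl]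
      by_cases h6 : cr + 1 ≥ 6
      · rw [if_pos h6]
        rcases hr : pvRuns cs with _ | ⟨⟨k, n⟩, rest⟩
        · simp [pvRuns, hr, pvBump, pvFindRun, (by omega : 1 + cr ≥ 6)]
        · by_cases hk : (1 : Int) = k
          · subst hk
            simp [pvRuns, hr, pvBump, pvFindRun, (by omega : n + 1 + cr ≥ 6)]
          · simp [pvRuns, hr, if_neg hk, pvBump, pvFindRun, (by omega : 1 + cr ≥ 6)]
      · rw [if_neg h6, ih]
        rcases hr : pvRuns cs with _ | ⟨⟨k, n⟩, rest⟩
        · simp [pvRuns, hr, pvBump, pvFindRun, (show ¬ (6 ≤ 1 + cr) by omega)]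
        · by_cases hk : (1 : Int) = k
          · subst hk
            have hsum : n + (cr + 1) = n + 1 + cr := by omega
            simp [pvRuns, hr, pvBump, hsum]
          · have hkne : k ≠ 1 := fun h => hk h.symm
            simp only [pvRuns, hr, if_neg hk, pvBump, if_pos rfl, if_neg hkne, pvFindRun]
            by_cases hkm : k = -1
            · simp [hkm, (show ¬ (6 ≤ 1 + cr) by omega)]
            · simp [if_neg hkne, if_neg hkm, (show ¬ (6 ≤ 1 + cr) by omega)]
    · by_cases h2 : c = -1
      · subst h2
        rw [pvLoopC]
        simp only [if_neg (by norm_num : (-1 : Int) ≠ 1), if_pos rfl]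
        by_cases h6 : cd + 1 ≥ 6
        · rw [if_pos h6]
          rcases hr : pvRuns cs with _ | ⟨⟨k, n⟩, rest⟩
          · simp [pvRuns, hr, pvBump, pvFindRun, (by omega : 1 + cd ≥ 6)]
          · by_cases hk : (-1 : Int) = k
            · subst hk
              simp [pvRuns, hr, pvBump, pvFindRun, (by omega : n + 1 + cd ≥ 6)]
            · simp [pvRuns, hr, if_neg hk, pvBump, pvFindRun, (by omega : 1 + cd ≥ 6)]
        · rw [if_neg h6, ih]
          rcases hr : pvRuns cs with _ | ⟨⟨k, n⟩, rest⟩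
          · simp [pvRuns, hr, pvBump, pvFindRun, (show ¬ (6 ≤ 1 + cd) by omega)]
          · by_cases hk : (-1 : Int) = k
            · subst hk
              have hsum : n + (cd + 1) = n + 1 + cd := by omega
              simp [pvRuns, hr, pvBump, hsum]
            · have hkne : k ≠ -1 := fun h => hk h.symm
              simp only [pvRuns, hr, if_neg hk, pvBump, pvFindRun,
                if_neg (by norm_num : (-1 : Int) ≠ 1), if_pos rfl, if_neg hkne]
              by_cases hk1 : k = 1
              · simp [hk1, (show ¬ (6 ≤ 1 + cd) by omega)]
              · simp [if_neg hk1, if_neg hkne, (show ¬ (6 ≤ 1 + cd) by omega)]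
      · rw [pvLoopC]
        simp only [if_neg h1, if_neg h2]
        rw [ih]
        rcases hr : pvRuns cs with _ | ⟨⟨k, n⟩, rest⟩
        · simp [pvRuns, hr, pvBump, pvFindRun, h1, h2]
        · by_cases hk : c = k
          · subst hk
            simp [pvRuns, hr, pvBump, pvFindRun, h1, h2]
          · simp [pvRuns, hr, if_neg hk, pvBump, pvFindRun, h1, h2]

theorem pvBump_zero (rs : List (Int × Nat)) : pvBump rs 0 0 = rs := by
  rcases rs with _ | ⟨⟨k, n⟩, rest⟩
  · rfl
  · simp [pvBump]

-- ===== VERDICT (by name: the statement is the Claim_ definition above) =====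
theorem is_early_match_stable4k_6min_spec : Claim_equal_is_early_match_stable4k_6min := by
  intro match_ _
  unfold Spec_is_early_match_stable4k_6min
  simp only [is_early_match_stable4k_6min, is_early_match_stable4k_6min_alt]
  split
  · rfl
  · have h := pvLoopA_eq_loopC (PySem.List.pyRange 15 (min 30 (pvLeads match_).length) 1)
      (pvLeads match_) 0 0
    simp only [Nat.cast_zero] at h
    rw [h, pvLoopC_eq_findRun, pvBump_zero]
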